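-- pv_equiv track=rewrite | github.com/qrmbqh/Efficient-SKU-to-Rack-Assignment-via-Correlation-Optimization | functions.py | genInitialRacks
-- ===== SOURCE A (Python) =====
-- def transform_rack_to_sku_matrix(rack):
--     """
--     将货架-SKU存储数据转换为SKU-货架矩阵形式。
--
--     输入的二维列表 rack 中，每个子列表代表一个货架上存储的 SKU 列表。函数返回一个 SKU-货架矩阵，其中行表示 SKU，列表示货架。矩阵中的值为 1 表示 SKU 存储在该货架上，0 表示未存储。
--
--     参数:
--     rack (list of lists): 一个二维列表，其中每个子列表代表一个货架上存储的 SKU 列表。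
--                          例如：[[22, 35, 43], [1, 7, 25, 33], [6, 42, 46]]
--
--     返回:
--     list of lists: 返回一个 SKU-货架矩阵（二维列表），行表示 SKU，列表示货架。
--                    如果 SKU 存储在某个货架上，则交点位置为 1，否则为 0。
--
--     """
--     # 获取所有SKU的集合以确定行数，并找到货架的数量确定列数
--     all_skus = {sku for shelf in rack for sku in shelf}
--     max_sku = max(all_skus)  # 假设SKU编号为整数
--     num_shelves = len(rack)
--
--     # 初始化一个SKU x 货架的矩阵
--     sku_matrix = [[0] * num_shelves for _ in range(max_sku + 1)]
--
--     # 填充矩阵：若SKU存储在某货架上，设为1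
--     for shelf_index, shelf in enumerate(rack):
--         for sku in shelf:
--             sku_matrix[sku][shelf_index] = 1
--
--     # 移除空行（即没有在任何货架上的 SKU）
--     sku_matrix = [row for row in sku_matrix if any(row)]
--
--     return sku_matrix
--
-- def genInitialRacks(skuNum, shelfCapacity, orders):
--     sorted_orders = [order for _, order in sorted(orders.items(), key=lambda x: len(x[1]))]
--     racks = []
--     skuAssigned = [0]*skuNum
--     rack = []
--     for order in sorted_orders:
--         for sku in order:
--             if skuAssigned[sku] == 0 and len(rack) < shelfCapacity:
--                 rack.append(sku)
--                 skuAssigned[sku] = 1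
--                 if len(rack) == shelfCapacity:
--                     racks.append(rack)
--                     rack = []
--
--     for sku in range(skuNum):
--         if skuAssigned[sku] == 0 and len(rack) < shelfCapacity:
--             rack.append(sku)
--             skuAssigned[sku] = 1
--             if len(rack) == shelfCapacity:
--                 racks.append(rack)
--                 rack = []
--     racks = transform_rack_to_sku_matrix(racks)
--     return racks
-- ===== SOURCE B (Python) =====
-- def genInitialRacks(skuNum, shelfCapacity, orders):
--     # Build one assignment stream: first-seen SKUs over the length-sorted orders,
--     # then the still-unassigned SKUs in ascending order.
--     assigned = [False] * skuNum
--     stream = []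
--     for _, order in sorted(orders.items(), key=lambda kv: len(kv[1])):
--         for sku in order:
--             if not assigned[sku]:
--                 assigned[sku] = True
--                 stream.append(sku)
--     for sku in range(skuNum):
--         if not assigned[sku]:
--             assigned[sku] = True
--             stream.append(sku)
--     # Slice the stream into full racks; a partial tail is discarded.
--     racks = [stream[i:i + shelfCapacity]
--              for i in range(0, len(stream) - shelfCapacity + 1, shelfCapacity)]
--     # Map each assigned SKU to its rack and emit one one-hot row per SKU, ascending.
--     pos = {}
--     for j, rack in enumerate(racks):
--         for sku in rack:
--             pos[sku] = j
--     return [[1 if c == pos[sku] else 0 for c in range(len(racks))]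
--             for sku in range(skuNum) if sku in pos]
-- ===== Notes on version B (the rewrite author's own statement) =====
-- stated objective: alternative
-- what changed: B materializes the greedy assignment as one explicit deduplicated SKU stream that is sliced into full racks and rendered through a sku->rack-index dict as ascending one-hot rows, instead of A's incremental rack/racks accumulator plus a dense (max_sku+1)x(shelves) matrix filled cell by cell and then filtered for nonzero rows; Pre_ excludes inputs where A raises (out-of-range SKU ids, no full rack forming) and negative SKU ids in [-skuNum,0), where A's negative-index wraparound into the dense matrix is an accident of its implementation.
-- outside the precondition, e.g. on genInitialRacks(5, 2, {0: [-1]}): A returns [[1, 0], [0, 1], [1, 1]], B returns [[1, 0], [0, 1], [0, 1]]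
import Mathlib
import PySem

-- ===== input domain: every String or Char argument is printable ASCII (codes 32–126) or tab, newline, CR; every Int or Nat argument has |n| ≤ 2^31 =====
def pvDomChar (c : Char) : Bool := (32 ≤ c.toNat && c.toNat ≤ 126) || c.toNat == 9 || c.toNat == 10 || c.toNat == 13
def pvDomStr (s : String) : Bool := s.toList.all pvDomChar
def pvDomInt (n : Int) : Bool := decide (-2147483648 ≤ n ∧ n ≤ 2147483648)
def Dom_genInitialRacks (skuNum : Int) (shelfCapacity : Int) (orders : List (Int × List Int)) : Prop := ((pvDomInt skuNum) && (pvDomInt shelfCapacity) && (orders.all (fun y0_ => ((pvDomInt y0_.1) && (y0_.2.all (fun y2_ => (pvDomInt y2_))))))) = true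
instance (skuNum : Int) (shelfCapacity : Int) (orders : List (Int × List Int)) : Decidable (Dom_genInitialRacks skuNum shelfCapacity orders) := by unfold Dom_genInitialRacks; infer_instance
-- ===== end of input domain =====

-- B replaces A's flag-array greedy loop and dense (max_sku+1)×shelves matrix by an explicit
-- deduplicated assignment stream that is sliced into racks and rendered as one-hot rows via a
-- sku→rack dict (alternative decomposition; not claimed faster).

-- ===== PORT A =====
-- sorted(orders.items(), key=lambda x: len(x[1])) then keep the order lists (shared first line of Source A and Source B)
def pvSortedOrders (orders : List (Int × List Int)) : List (List Int) :=
  (PySem.List.sorted orders (fun x => x.2.length) false).map (fun p => p.2)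

-- sku_matrix[sku][shelf_index] = 1  (pyGet?/pySetD keep Python's negative-index wrap; IndexError = unchanged, unreachable under Pre_)
def pvSetCell (m : List (List Int)) (sku : Int) (j : Int) : List (List Int) :=
  match PySem.List.pyGet? m sku with
  | none => m
  | some row => PySem.List.pySetD m sku (PySem.List.pySetD row j 1)

def pvTransform (rack : List (List Int)) : List (List Int) :=
  match PySem.List.max? (PySem.Set.ofList rack.flatten) (fun x => x) with
  | none => []  -- Python: max() of the empty set raises ValueError; unreachable under Pre_
  | some maxSku =>
    let numShelves := rack.length
    let init := (PySem.List.pyRange 0 (maxSku + 1) 1).map (fun _ => List.replicate numShelves (0:Int))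
    let filled := (PySem.List.enumerate rack 0).foldl
      (fun m p => p.2.foldl (fun m sku => pvSetCell m sku p.1) m) init
    filled.filter (fun row => row.any (fun v => !(v == 0)))

-- body of A's two identical assignment loops; state = (racks, skuAssigned, rack)
def pvStepA (shelfCapacity : Int) (st : List (List Int) × List Int × List Int) (sku : Int) :
    List (List Int) × List Int × List Int :=
  match PySem.List.pyGet? st.2.1 sku with
  | none => st  -- Python raises IndexError here; unreachable under Pre_
  | some v =>
    if v = 0 ∧ (st.2.2.length : Int) < shelfCapacity then
      let rack := st.2.2 ++ [sku]
      let flags := PySem.List.pySetD st.2.1 sku 1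
      if (rack.length : Int) = shelfCapacity then (st.1 ++ [rack], flags, [])
      else (st.1, flags, rack)
    else st

def genInitialRacks (skuNum : Int) (shelfCapacity : Int) (orders : List (Int × List Int)) : List (List Int) :=
  let st0 : List (List Int) × List Int × List Int := ([], List.replicate skuNum.toNat 0, [])
  let st1 := (pvSortedOrders orders).foldl (fun st order => order.foldl (pvStepA shelfCapacity) st) st0
  let st2 := (PySem.List.pyRange 0 skuNum 1).foldl (pvStepA shelfCapacity) st1
  pvTransform st2.1

-- ===== PORT B =====
-- if not assigned[sku]: assigned[sku] = True; stream.append(sku)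
-- (pyGet?/pySetD keep Python's list-index semantics; IndexError = unchanged, unreachable under Pre_)
def pvStepB (st : List Bool × List Int) (sku : Int) : List Bool × List Int :=
  match PySem.List.pyGet? st.1 sku with
  | none => st
  | some v => if v = false then (PySem.List.pySetD st.1 sku true, st.2 ++ [sku]) else st

-- [1 if c == j else 0 for c in range(n)]
def pvOneHot (n : Int) (j : Int) : List Int :=
  (PySem.List.pyRange 0 n 1).map (fun c => if c == j then (1:Int) else 0)

def genInitialRacks_alt (skuNum : Int) (shelfCapacity : Int) (orders : List (Int × List Int)) : List (List Int) :=
  let st0 : List Bool × List Int := (List.replicate skuNum.toNat false, [])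
  let st1 := (pvSortedOrders orders).foldl (fun st order => order.foldl pvStepB st) st0
  let st2 := (PySem.List.pyRange 0 skuNum 1).foldl pvStepB st1
  let stream := st2.2
  let racks := (PySem.List.pyRange 0 ((stream.length : Int) - shelfCapacity + 1) shelfCapacity).map
    (fun i => PySem.List.slice stream (some i) (some (i + shelfCapacity)))
  let pos := (PySem.List.enumerate racks 0).foldl
    (fun d p => p.2.foldl (fun d sku => d.insert sku p.1) d) (PySem.Dict.empty : PySem.Dict Int Int)
  (PySem.List.pyRange 0 skuNum 1).filterMap
    (fun sku => (pos.get? sku).map (fun j => pvOneHot (racks.length : Int) j))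

-- ===== PRECONDITION & SPEC =====
-- Pre_ restricts to the task's natural domain: SKU ids in [0, skuNum) and 1 ≤ shelfCapacity ≤ skuNum.
-- Outside it A either raises (IndexError on skuAssigned[sku] for sku ≥ skuNum or sku < -skuNum;
-- ValueError from max() when no full rack forms, i.e. shelfCapacity < 1 or skuNum < shelfCapacity)
-- or, for SKU ids in [-skuNum, 0), silently wraps the negative index into the flag array —
-- an accident of A's implementation that a natural B does not reproduce.
def Pre_genInitialRacks (skuNum : Int) (shelfCapacity : Int) (orders : List (Int × List Int)) : Prop :=
  1 ≤ shelfCapacity ∧ shelfCapacity ≤ skuNum ∧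
    ∀ p ∈ orders, ∀ sku ∈ p.2, 0 ≤ sku ∧ sku < skuNum
instance (skuNum : Int) (shelfCapacity : Int) (orders : List (Int × List Int)) : Decidable (Pre_genInitialRacks skuNum shelfCapacity orders) := by unfold Pre_genInitialRacks; infer_instance

def pvWitness_genInitialRacks : Int × Int × (List (Int × List Int)) := (3, 2, [(0, [1, 1, 2]), (1, [0])])

def Spec_genInitialRacks (skuNum : Int) (shelfCapacity : Int) (orders : List (Int × List Int)) (out : List (List Int)) : Prop := out = genInitialRacks_alt skuNum shelfCapacity orders
instance (skuNum : Int) (shelfCapacity : Int) (orders : List (Int × List Int)) (out : List (List Int)) : Decidable (Spec_genInitialRacks skuNum shelfCapacity orders out) := by unfold Spec_genInitialRacks; infer_instance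

-- ===== CLAIM (what is proved, stated in full; the proofs are below) =====
def Claim_equal_genInitialRacks : Prop := ∀ (skuNum : Int) (shelfCapacity : Int) (orders : List (Int × List Int)), Dom_genInitialRacks skuNum shelfCapacity orders → Pre_genInitialRacks skuNum shelfCapacity orders → Spec_genInitialRacks skuNum shelfCapacity orders (genInitialRacks skuNum shelfCapacity orders)

-- ===== LEMMAS AND PROOFS =====

-- ---- proof-side abstractions ----

-- ordered dedup of a sku list against a seen-set
def pvDD (seen : PySem.Set Int) : List Int → List Int
  | [] => []
  | x :: xs => if PySem.Set.contains seen x then pvDD seen xs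
               else x :: pvDD (PySem.Set.add seen x) xs

-- rack-chunking step: append to the open rack, flush when it reaches cap
def pvCF (cap : Int) (st : List (List Int) × List Int) (sku : Int) : List (List Int) × List Int :=
  if ((st.2 ++ [sku]).length : Int) = cap then (st.1 ++ [st.2 ++ [sku]], []) else (st.1, st.2 ++ [sku])

-- the first (len/k) full chunks of size k
def pvChunk (k : Nat) (xs : List Int) : List (List Int) :=
  (List.range (xs.length / k)).map (fun j => (xs.drop (j*k)).take k)

-- the row the matrix construction produces for sku s
def pvRowOf (racks : List (List Int)) (s : Int) : List Int :=
  racks.map (fun r => if s ∈ r then (1:Int) else 0)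

-- the (sku, rack index) pairs inserted into B's dict
def pvPairs (racks : List (List Int)) (off : Int) : List (Int × Int) :=
  (PySem.List.enumerate racks off).flatMap (fun p => p.2.map (fun sku => (sku, p.1)))

-- B's flag array agrees with a proof-side seen-set on [0, skuNum)
def pvRelB (skuNum : Int) (flags : List Bool) (seen : PySem.Set Int) : Prop :=
  flags.length = skuNum.toNat ∧
  ∀ s : Int, 0 ≤ s → s < skuNum → PySem.List.pyGet? flags s = some (decide (s ∈ seen))

-- A's flag array agrees with B's seen-set on [0, skuNum)
def pvRel (skuNum : Int) (flags : List Int) (seen : PySem.Set Int) : Prop :=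
  flags.length = skuNum.toNat ∧
  ∀ s : Int, 0 ≤ s → s < skuNum → PySem.List.pyGet? flags s = some (if s ∈ seen then (1:Int) else 0)

theorem pvSetD_nonneg {α : Type} (xs : List α) (i : Int) (v : α) (h : 0 ≤ i) :
    PySem.List.pySetD xs i v = if i.toNat < xs.length then xs.set i.toNat v else xs := by
  simp only [PySem.List.pySetD, PySem.List.pySet?, PySem.List.pyIdx?, if_pos h]
  split
  · rename_i h2; rw [if_pos]; · simp
    omega
  · rename_i h2; rw [if_neg]; · simp
    omega

theorem pvSetD_length {α : Type} (xs : List α) (i : Int) (v : α) :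
    (PySem.List.pySetD xs i v).length = xs.length := by
  simp only [PySem.List.pySetD, PySem.List.pySet?, PySem.List.pyIdx?]
  split <;> split <;> simp

theorem pvSetD_idem (row : List Int) (j : Int) (v : Int) :
    PySem.List.pySetD (PySem.List.pySetD row j v) j v = PySem.List.pySetD row j v := by
  have hl : (PySem.List.pySetD row j v).length = row.length := pvSetD_length row j v
  conv_lhs => rw [PySem.List.pySetD, PySem.List.pySet?, hl]
  cases h : PySem.List.pyIdx? row.length j with
  | none => simp
  | some k =>
    have : PySem.List.pySetD row j v = row.set k v := by
      rw [PySem.List.pySetD, PySem.List.pySet?, h]; simp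
    simp [this, List.set_set]

theorem pvContains_iff (s : PySem.Set Int) (x : Int) : PySem.Set.contains s x = true ↔ x ∈ s := by
  simp [PySem.Set.contains, List.contains_iff_mem]

theorem pvMem_pvDD (xs : List Int) : ∀ (seen : PySem.Set Int) (y : Int),
    y ∈ pvDD seen xs ↔ y ∈ xs ∧ y ∉ seen := by
  induction xs with
  | nil => simp [pvDD]
  | cons x xs ih =>
    intro seen y
    by_cases h : PySem.Set.contains seen x
    · rw [pvDD, if_pos h, ih]
      have hx : x ∈ seen := (pvContains_iff _ _).mp h
      constructor
      · rintro ⟨h1, h2⟩; exact ⟨List.mem_cons_of_mem _ h1, h2⟩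
      · rintro ⟨h1, h2⟩
        rcases List.mem_cons.mp h1 with rfl | h1
        · exact absurd hx h2
        · exact ⟨h1, h2⟩
    · rw [pvDD, if_neg h]
      have hx : x ∉ seen := fun hm => h ((pvContains_iff _ _).mpr hm)
      simp only [List.mem_cons, ih, PySem.Set.mem_add]
      constructor
      · rintro (rfl | ⟨h1, h2⟩)
        · exact ⟨Or.inl rfl, hx⟩
        · exact ⟨Or.inr h1, fun hm => h2 (Or.inl hm)⟩
      · rintro ⟨rfl | h1, h2⟩
        · exact Or.inl rfl
        · by_cases hxy : y = x
          · exact Or.inl hxy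
          · exact Or.inr ⟨h1, fun hm => (hm.elim (fun a => h2 a) (fun a => hxy a) : False)⟩

theorem pvNodup_pvDD (xs : List Int) : ∀ seen : PySem.Set Int, (pvDD seen xs).Nodup := by
  induction xs with
  | nil => intro seen; simp [pvDD]
  | cons x xs ih =>
    intro seen
    by_cases h : PySem.Set.contains seen x
    · rw [pvDD, if_pos h]; exact ih seen
    · rw [pvDD, if_neg h]
      refine List.nodup_cons.mpr ⟨?_, ih _⟩
      intro hmem
      rcases (pvMem_pvDD xs _ x).mp hmem with ⟨-, h2⟩
      exact h2 (PySem.Set.mem_add seen x x |>.mpr (Or.inr rfl))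

theorem pvAdd_mem (seen : PySem.Set Int) (x : Int) (h : x ∈ seen) : PySem.Set.add seen x = seen := by
  simp [PySem.Set.add, h]

theorem pvMainB (skuNum : Int) :
    ∀ (xs : List Int) (flags : List Bool) (acc : List Int) (seen : PySem.Set Int),
    (∀ x ∈ xs, 0 ≤ x ∧ x < skuNum) → pvRelB skuNum flags seen →
    (xs.foldl pvStepB (flags, acc)).2 = acc ++ pvDD seen xs ∧
    pvRelB skuNum (xs.foldl pvStepB (flags, acc)).1 (PySem.Set.update seen xs) := by
  intro xs
  induction xs with
  | nil => intro flags acc seen hxs hrel; exact ⟨by simp [pvDD], hrel⟩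
  | cons x xs ih =>
    intro flags acc seen hxs hrel
    obtain ⟨hx0, hxn⟩ := hxs x (List.mem_cons_self)
    obtain ⟨hlen, hget⟩ := hrel
    have hgetx : PySem.List.pyGet? flags x = some (decide (x ∈ seen)) := hget x hx0 hxn
    have hxs' : ∀ y ∈ xs, 0 ≤ y ∧ y < skuNum := fun y hy => hxs y (List.mem_cons_of_mem _ hy)
    by_cases hmem : x ∈ seen
    · have hstep : pvStepB (flags, acc) x = (flags, acc) := by
        simp only [pvStepB, hgetx, decide_eq_true hmem]
        rw [if_neg]; simp
      rw [List.foldl_cons, hstep, pvDD.eq_2, if_pos ((pvContains_iff seen x).mpr hmem),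
        show PySem.Set.update seen (x :: xs) = PySem.Set.update (PySem.Set.add seen x) xs from rfl,
        pvAdd_mem seen x hmem]
      exact ih flags acc seen hxs' ⟨hlen, hget⟩
    · have hstep : pvStepB (flags, acc) x = (PySem.List.pySetD flags x true, acc ++ [x]) := by
        simp [pvStepB, hgetx, decide_eq_false hmem]
      have hxlt : x.toNat < flags.length := by rw [hlen]; omega
      have hflags' : PySem.List.pySetD flags x true = flags.set x.toNat true := by
        rw [pvSetD_nonneg flags x true hx0, if_pos hxlt]
      have hrel' : pvRelB skuNum (PySem.List.pySetD flags x true) (PySem.Set.add seen x) := by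
        constructor
        · rw [pvSetD_length, hlen]
        · intro s hs0 hsn
          have hslt : s.toNat < flags.length := by rw [hlen]; omega
          rw [hflags', PySem.List.pyGet?_of_nonneg _ hs0, List.getElem?_set]
          by_cases hsx : s = x
          · subst hsx
            simp [hslt, PySem.Set.mem_add]
          · have : x.toNat ≠ s.toNat := by omega
            rw [if_neg this, ← PySem.List.pyGet?_of_nonneg _ hs0, hget s hs0 hsn]
            have : (s ∈ PySem.Set.add seen x) ↔ s ∈ seen := by
              rw [PySem.Set.mem_add]
              exact ⟨fun h => h.elim id (fun h => absurd h hsx), Or.inl⟩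
            simp only [this]
      have hdd : pvDD seen (x :: xs) = x :: pvDD (PySem.Set.add seen x) xs := by
        rw [pvDD.eq_2, if_neg (fun hc => hmem ((pvContains_iff seen x).mp hc))]
      rw [List.foldl_cons, hstep, hdd,
        show PySem.Set.update seen (x :: xs) = PySem.Set.update (PySem.Set.add seen x) xs from rfl]
      obtain ⟨h1, h2⟩ := ih (PySem.List.pySetD flags x true) (acc ++ [x]) (PySem.Set.add seen x) hxs' hrel'
      exact ⟨by rw [h1]; simp, h2⟩

theorem pvMainA (cap skuNum : Int) (hcap : 1 ≤ cap) :
    ∀ (xs : List Int) (racks : List (List Int)) (flags rack : List Int) (seen : PySem.Set Int),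
    (∀ x ∈ xs, 0 ≤ x ∧ x < skuNum) → pvRel skuNum flags seen → ((rack.length : Int) < cap) →
    (xs.foldl (pvStepA cap) (racks, flags, rack)).1 = ((pvDD seen xs).foldl (pvCF cap) (racks, rack)).1 ∧
    (xs.foldl (pvStepA cap) (racks, flags, rack)).2.2 = ((pvDD seen xs).foldl (pvCF cap) (racks, rack)).2 ∧
    pvRel skuNum (xs.foldl (pvStepA cap) (racks, flags, rack)).2.1 (PySem.Set.update seen xs) ∧
    (((xs.foldl (pvStepA cap) (racks, flags, rack)).2.2.length : Int) < cap) := by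
  intro xs
  induction xs with
  | nil =>
    intro racks flags rack seen hxs hrel hrack
    exact ⟨rfl, rfl, hrel, hrack⟩
  | cons x xs ih =>
    intro racks flags rack seen hxs hrel hrack
    obtain ⟨hx0, hxn⟩ := hxs x (List.mem_cons_self)
    obtain ⟨hlen, hget⟩ := hrel
    have hgetx : PySem.List.pyGet? flags x = some (if x ∈ seen then (1:Int) else 0) := hget x hx0 hxn
    by_cases hmem : x ∈ seen
    · -- already assigned: both sides skip x
      have hstep : pvStepA cap (racks, flags, rack) x = (racks, flags, rack) := by
        simp only [pvStepA, hgetx, if_pos hmem]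
        rw [if_neg]; rintro ⟨h1, -⟩; exact one_ne_zero h1
      rw [List.foldl_cons, hstep, pvDD.eq_2, if_pos ((pvContains_iff seen x).mpr hmem),
        show PySem.Set.update seen (x :: xs) = PySem.Set.update (PySem.Set.add seen x) xs from rfl,
        pvAdd_mem seen x hmem]
      exact ih racks flags rack seen (fun y hy => hxs y (List.mem_cons_of_mem _ hy)) ⟨hlen, hget⟩ hrack
    · -- new sku
      have hxlt : x.toNat < flags.length := by rw [hlen]; omega
      have hflags' : PySem.List.pySetD flags x 1 = flags.set x.toNat 1 := by
        rw [pvSetD_nonneg flags x 1 hx0, if_pos hxlt]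
      have hrel' : pvRel skuNum (PySem.List.pySetD flags x 1) (PySem.Set.add seen x) := by
        constructor
        · rw [pvSetD_length, hlen]
        · intro s hs0 hsn
          have hslt : s.toNat < flags.length := by rw [hlen]; omega
          rw [hflags', PySem.List.pyGet?_of_nonneg _ hs0, List.getElem?_set]
          by_cases hsx : s = x
          · subst hsx
            simp [hslt, PySem.Set.mem_add]
          · have : x.toNat ≠ s.toNat := by omega
            rw [if_neg this, ← PySem.List.pyGet?_of_nonneg _ hs0, hget s hs0 hsn]
            have : (s ∈ PySem.Set.add seen x) ↔ s ∈ seen := by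
              rw [PySem.Set.mem_add]
              exact ⟨fun h => h.elim id (fun h => absurd h hsx), Or.inl⟩
            simp only [this]
      have hcond : (if x ∈ seen then (1:Int) else 0) = 0 ∧ ((rack.length : Int) < cap) := by
        rw [if_neg hmem]; exact ⟨rfl, hrack⟩
      have hdd : pvDD seen (x :: xs) = x :: pvDD (PySem.Set.add seen x) xs := by
        rw [pvDD.eq_2, if_neg (fun hc => hmem ((pvContains_iff seen x).mp hc))]
      have hupd : PySem.Set.update seen (x :: xs) = PySem.Set.update (PySem.Set.add seen x) xs := rfl
      have hxs' : ∀ y ∈ xs, 0 ≤ y ∧ y < skuNum := fun y hy => hxs y (List.mem_cons_of_mem _ hy)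
      by_cases hfull : ((rack ++ [x]).length : Int) = cap
      · have hstep : pvStepA cap (racks, flags, rack) x =
            (racks ++ [rack ++ [x]], PySem.List.pySetD flags x 1, []) := by
          simp only [pvStepA, hgetx, if_pos hcond, if_pos hfull]
        have hcf : pvCF cap (racks, rack) x = (racks ++ [rack ++ [x]], []) := by
          simp only [pvCF, if_pos hfull]
        rw [List.foldl_cons, hstep, hdd, List.foldl_cons, hcf, hupd]
        exact ih _ _ _ _ hxs' hrel' (by simpa using hcap)
      · have hstep : pvStepA cap (racks, flags, rack) x =
            (racks, PySem.List.pySetD flags x 1, rack ++ [x]) := by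
          simp only [pvStepA, hgetx, if_pos hcond, if_neg hfull]
        have hcf : pvCF cap (racks, rack) x = (racks, rack ++ [x]) := by
          simp only [pvCF, if_neg hfull]
        rw [List.foldl_cons, hstep, hdd, List.foldl_cons, hcf, hupd]
        refine ih _ _ _ _ hxs' hrel' ?_
        simp only [List.length_append, List.length_cons, List.length_nil] at *
        omega

theorem pvCF_racks (cap : Int) (xs : List Int) : ∀ (racks : List (List Int)) (rack : List Int),
    xs.foldl (pvCF cap) (racks, rack) =
      (racks ++ (xs.foldl (pvCF cap) ([], rack)).1, (xs.foldl (pvCF cap) ([], rack)).2) := by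
  induction xs with
  | nil => intro racks rack; simp
  | cons x xs ih =>
    intro racks rack
    rw [List.foldl_cons, List.foldl_cons]
    by_cases h : (((rack ++ [x]).length : Int) = cap)
    · rw [show pvCF cap (racks, rack) x = (racks ++ [rack ++ [x]], []) by simp only [pvCF, if_pos h],
        show pvCF cap ([], rack) x = ([rack ++ [x]], []) by simp only [pvCF, if_pos h, List.nil_append]]
      rw [ih (racks ++ [rack ++ [x]]) [], ih [rack ++ [x]] []]
      simp
    · rw [show pvCF cap (racks, rack) x = (racks, rack ++ [x]) by simp only [pvCF, if_neg h],
        show pvCF cap ([], rack) x = ([], rack ++ [x]) by simp only [pvCF, if_neg h]]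
      exact ih racks (rack ++ [x])

theorem pvCF_small (cap : Int) (xs : List Int) : ∀ (racks : List (List Int)) (rack : List Int),
    ((rack.length + xs.length : Int) < cap) →
    xs.foldl (pvCF cap) (racks, rack) = (racks, rack ++ xs) := by
  induction xs with
  | nil => intro racks rack h; simp
  | cons x xs ih =>
    intro racks rack h
    simp only [List.length_cons] at h
    have hne : (((rack ++ [x]).length : Int) ≠ cap) := by simp; omega
    rw [List.foldl_cons, show pvCF cap (racks, rack) x = (racks, rack ++ [x]) by
      simp only [pvCF, if_neg hne]]
    rw [ih racks (rack ++ [x]) (by simp; omega)]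
    simp

theorem pvCF_exact (cap : Int) (xs : List Int) : ∀ (racks : List (List Int)) (rack : List Int),
    xs ≠ [] → ((rack.length + xs.length : Int) = cap) →
    xs.foldl (pvCF cap) (racks, rack) = (racks ++ [rack ++ xs], []) := by
  induction xs with
  | nil => intro racks rack hne h; exact absurd rfl hne
  | cons x xs ih =>
    intro racks rack hne h
    simp only [List.length_cons] at h
    rcases List.eq_nil_or_concat' xs with rfl | hxs
    · have hfull : (((rack ++ [x]).length : Int) = cap) := by simp; simp at h; omega
      rw [List.foldl_cons, show pvCF cap (racks, rack) x = (racks ++ [rack ++ [x]], []) by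
        simp only [pvCF, if_pos hfull], List.foldl_nil]
    · obtain ⟨-, -, hxsne⟩ : True ∧ True ∧ xs ≠ [] := by
        obtain ⟨ys, y, rfl⟩ := hxs; simp
      have hne2 : (((rack ++ [x]).length : Int) ≠ cap) := by
        simp; have := List.length_pos_iff.mpr hxsne; omega
      rw [List.foldl_cons, show pvCF cap (racks, rack) x = (racks, rack ++ [x]) by
        simp only [pvCF, if_neg hne2]]
      rw [ih racks (rack ++ [x]) hxsne (by simp; omega)]
      simp

theorem pvChunk_nil (k : Nat) (xs : List Int) (h : xs.length < k) : pvChunk k xs = [] := by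
  simp [pvChunk, Nat.div_eq_of_lt h]

theorem pvChunk_cons (k : Nat) (xs : List Int) (hk : 0 < k) (h : k ≤ xs.length) :
    pvChunk k xs = xs.take k :: pvChunk k (xs.drop k) := by
  unfold pvChunk
  rw [Nat.div_eq_sub_div hk h, List.range_succ_eq_map]
  simp only [List.map_cons, List.map_map, Nat.zero_mul, List.drop_zero, List.length_drop]
  congr 1
  apply List.map_congr_left
  intro j hj
  simp only [Function.comp_apply, List.drop_drop]
  congr 2
  rw [Nat.succ_mul, Nat.mul_comm j k]
  omega

theorem pvCF_chunk (cap : Int) (hcap : 1 ≤ cap) : ∀ (xs : List Int),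
    (xs.foldl (pvCF cap) ([], [])).1 = pvChunk cap.toNat xs := by
  have hk : 0 < cap.toNat := by omega
  have hcast : ((cap.toNat : Int)) = cap := Int.toNat_of_nonneg (by omega)
  suffices H : ∀ n (xs : List Int), xs.length ≤ n →
      (xs.foldl (pvCF cap) ([], [])).1 = pvChunk cap.toNat xs by
    intro xs; exact H xs.length xs le_rfl
  intro n
  induction n with
  | zero =>
    intro xs hlen
    rw [List.length_eq_zero_iff.mp (Nat.le_zero.mp hlen)]
    simp [pvChunk]
  | succ n ih =>
    intro xs hlen
    by_cases hsmall : xs.length < cap.toNat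
    · rw [pvChunk_nil _ _ hsmall, pvCF_small cap xs [] [] (by simp; omega)]
    · push_neg at hsmall
      have htake : (xs.take cap.toNat).length = cap.toNat := by
        simp [Nat.min_eq_left hsmall]
      have hne : xs.take cap.toNat ≠ [] := by
        intro hc; rw [hc] at htake; simp at htake; omega
      conv_lhs => rw [← List.take_append_drop cap.toNat xs, List.foldl_append]
      rw [pvCF_exact cap _ [] [] hne (by rw [htake]; simp [hcast])]
      rw [pvCF_racks]
      simp only [List.nil_append]
      rw [pvChunk_cons _ _ hk hsmall]
      have : (xs.drop cap.toNat).length ≤ n := by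
        simp only [List.length_drop]; omega
      rw [← ih _ this]
      simp

theorem pvSliceChunk (cap : Int) (hcap : 0 < cap) (xs : List Int) :
    (PySem.List.pyRange 0 ((xs.length : Int) - cap + 1) cap).map
      (fun i => PySem.List.slice xs (some i) (some (i + cap))) = pvChunk cap.toNat xs := by
  have hcast : ((cap.toNat : Int)) = cap := Int.toNat_of_nonneg (by omega)
  rw [PySem.List.pyRange_of_pos _ _ hcap, List.map_map, pvChunk]
  have hn : (if (0:Int) < (xs.length : Int) - cap + 1 then
      (((xs.length : Int) - cap + 1 - 0 + cap - 1) / cap).toNat else 0) = xs.length / cap.toNat := by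
    by_cases hb : (0:Int) < (xs.length : Int) - cap + 1
    · rw [if_pos hb]
      have : ((xs.length : Int) - cap + 1 - 0 + cap - 1) = (xs.length : Int) := by ring
      rw [this, ← hcast, ← Int.natCast_div, Int.toNat_natCast, Int.toNat_natCast]
    · rw [if_neg hb]
      have : xs.length < cap.toNat := by omega
      rw [Nat.div_eq_of_lt this]
  rw [hn]
  apply List.map_congr_left
  intro j hj
  simp only [Function.comp_apply]
  have h1 : (0 : Int) + cap * (j:Int) = ((cap.toNat * j : Nat) : Int) := by
    push_cast [hcast]; ring
  rw [h1, show ((cap.toNat * j : Nat) : Int) + cap = ((cap.toNat * j : Nat) : Int) + ((cap.toNat : Nat) : Int) by rw [hcast],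
    PySem.List.slice_natCast_add]
  rw [Nat.mul_comm]

theorem pvFlatten_chunk (k : Nat) (hk : 0 < k) : ∀ (xs : List Int),
    (pvChunk k xs).flatten = xs.take ((xs.length / k) * k) := by
  suffices H : ∀ n (xs : List Int), xs.length ≤ n →
      (pvChunk k xs).flatten = xs.take ((xs.length / k) * k) by
    intro xs; exact H xs.length xs le_rfl
  intro n
  induction n with
  | zero =>
    intro xs hlen
    rw [List.length_eq_zero_iff.mp (Nat.le_zero.mp hlen)]
    simp [pvChunk]
  | succ n ih =>
    intro xs hlen
    by_cases hsmall : xs.length < k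
    · rw [pvChunk_nil _ _ hsmall, Nat.div_eq_of_lt hsmall]
      simp
    · push_neg at hsmall
      rw [pvChunk_cons _ _ hk hsmall, List.flatten_cons,
        ih (xs.drop k) (by simp only [List.length_drop]; omega)]
      rw [Nat.div_eq_sub_div hk hsmall, Nat.succ_mul, Nat.add_comm ((xs.length - k)/k * k) k,
        List.take_add]
      simp [List.length_drop]

theorem pvSetCell_mapRange (f : Nat → List Int) (n : Nat) (x j : Int) (hx0 : 0 ≤ x) (hxn : (x:Int) < n) :
    pvSetCell ((List.range n).map f) x j =
      (List.range n).map (fun s => if s = x.toNat then PySem.List.pySetD (f s) j 1 else f s) := by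
  have hxlt : x.toNat < n := by omega
  have hget : PySem.List.pyGet? ((List.range n).map f) x = some (f x.toNat) := by
    rw [PySem.List.pyGet?_of_nonneg _ hx0]
    simp [hxlt]
  have hred : pvSetCell ((List.range n).map f) x j =
      PySem.List.pySetD ((List.range n).map f) x (PySem.List.pySetD (f x.toNat) j 1) := by
    rw [pvSetCell, hget]
  rw [hred, pvSetD_nonneg _ _ _ hx0, if_pos (by simpa using hxlt)]
  apply List.ext_getElem
  · simp
  · intro i h1 h2
    simp only [List.getElem_set, List.getElem_map, List.getElem_range]
    simp only [List.length_set, List.length_map, List.length_range] at h1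
    by_cases hix : x.toNat = i
    · subst hix; simp
    · rw [if_neg hix, if_neg (fun hc => hix hc.symm)]

theorem pvInner (shelf : List Int) (j : Int) (n : Nat) : ∀ (f : Nat → List Int),
    (∀ x ∈ shelf, 0 ≤ x ∧ (x:Int) < n) →
    shelf.foldl (fun m sku => pvSetCell m sku j) ((List.range n).map f) =
      (List.range n).map (fun (s : Nat) => if (s:Int) ∈ shelf then PySem.List.pySetD (f s) j 1 else f s) := by
  induction shelf with
  | nil => intro f hx; simp
  | cons x rest ih =>
    intro f hx
    obtain ⟨hx0, hxn⟩ := hx x List.mem_cons_self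
    rw [List.foldl_cons, pvSetCell_mapRange f n x j hx0 hxn,
      ih _ (fun y hy => hx y (List.mem_cons_of_mem _ hy))]
    apply List.map_congr_left
    intro s hs
    by_cases hsx : s = x.toNat
    · have hsxi : ((s:Int)) = x := by omega
      rw [if_pos hsx, if_pos (show (s:Int) ∈ x :: rest by rw [hsxi]; exact List.mem_cons_self)]
      by_cases hmem : (s:Int) ∈ rest
      · rw [if_pos hmem, pvSetD_idem]
      · rw [if_neg hmem]
    · have hsxi : ((s:Int)) ≠ x := by omega
      rw [if_neg hsx]
      by_cases hmem : (s:Int) ∈ rest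
      · rw [if_pos hmem, if_pos (List.mem_cons_of_mem _ hmem)]
      · rw [if_neg hmem, if_neg (by simp [hsxi, hmem])]

theorem pvOuter (racks : List (List Int)) (n : Nat) : ∀ (off : Int) (f : Nat → List Int),
    (∀ r ∈ racks, ∀ x ∈ r, 0 ≤ x ∧ (x:Int) < n) →
    (PySem.List.enumerate racks off).foldl
        (fun m p => p.2.foldl (fun m sku => pvSetCell m sku p.1) m) ((List.range n).map f) =
      (List.range n).map (fun (s : Nat) =>
        (PySem.List.enumerate racks off).foldl
          (fun row p => if (s:Int) ∈ p.2 then PySem.List.pySetD row p.1 1 else row) (f s)) := by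
  induction racks with
  | nil => intro off f hx; simp [PySem.List.enumerate]
  | cons r rest ih =>
    intro off f hx
    rw [PySem.List.enumerate_cons, List.foldl_cons]
    dsimp only
    rw [pvInner r off n f (hx r List.mem_cons_self),
      ih (off+1) _ (fun r' hr' => hx r' (List.mem_cons_of_mem _ hr'))]
    apply List.map_congr_left
    intro s hs
    rw [List.foldl_cons]

theorem pvRowFold (racks : List (List Int)) : ∀ (off : Nat) (row : List Int) (s : Int),
    off + racks.length ≤ row.length →
    ((PySem.List.enumerate racks (off:Int)).foldl
        (fun row p => if s ∈ p.2 then PySem.List.pySetD row p.1 1 else row) row).length = row.length ∧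
    ∀ c, c < row.length →
      ((PySem.List.enumerate racks (off:Int)).foldl
        (fun row p => if s ∈ p.2 then PySem.List.pySetD row p.1 1 else row) row).getD c 0 =
      if off ≤ c ∧ c < off + racks.length ∧ s ∈ racks.getD (c - off) [] then 1 else row.getD c 0 := by
  induction racks with
  | nil =>
    intro off row s hb
    refine ⟨by rw [PySem.List.enumerate_nil, List.foldl_nil], ?_⟩
    intro c hc
    have hno : ¬(off ≤ c ∧ c < off + ([] : List (List Int)).length ∧ s ∈ ([] : List (List Int)).getD (c - off) []) := by
      rintro ⟨h1, h2, -⟩; simp at h2; omega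
    rw [if_neg hno, PySem.List.enumerate_nil, List.foldl_nil]
  | cons r rest ih =>
    intro off row s hb
    simp only [List.length_cons] at hb
    have hofflt : off < row.length := by omega
    rw [PySem.List.enumerate_cons, List.foldl_cons]
    have hsetd : PySem.List.pySetD row (off:Int) 1 = row.set off 1 := by
      rw [pvSetD_nonneg _ _ _ (by omega), if_pos (by simpa using hofflt), Int.toNat_natCast]
    set row1 : List Int := if s ∈ r then PySem.List.pySetD row (off:Int) 1 else row with hrow1def
    have hl1 : row1.length = row.length := by
      rw [hrow1def]; split <;> simp only [pvSetD_length]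
    have hget_ne : ∀ c', c' ≠ off → row1.getD c' 0 = row.getD c' 0 := by
      intro c' hc'
      rw [hrow1def]
      split
      · rw [hsetd]
        simp [List.getD, List.getElem?_set_ne (fun h => hc' h.symm)]
      · rfl
    have hget_off_in : s ∈ r → row1.getD off 0 = 1 := by
      intro hmem
      rw [hrow1def, if_pos hmem, hsetd]
      simp [List.getD, hofflt]
    have hget_off_out : s ∉ r → row1.getD off 0 = row.getD off 0 := by
      intro hmem; rw [hrow1def, if_neg hmem]
    have hoffc : ((off:Int) + 1) = (((off + 1 : Nat)) : Int) := by push_cast; ring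
    have hb1 : (off+1) + rest.length ≤ row1.length := by rw [hl1]; omega
    obtain ⟨ihlen, ihget⟩ := ih (off+1) row1 s hb1
    rw [hoffc]
    refine ⟨by rw [ihlen, hl1], ?_⟩
    intro c hc
    rw [ihget c (by rw [hl1]; exact hc)]
    have hgd : c ≠ off → (r :: rest).getD (c - off) [] = rest.getD (c - (off+1)) [] ∨ c < off := by
      intro hne
      rcases Nat.lt_or_ge c off with h | h
      · exact Or.inr h
      · left
        have : c - off = (c - (off+1)) + 1 := by omega
        rw [this, List.getD_cons_succ]
    by_cases hceq : c = off
    · subst hceq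
      have hB : ¬(c + 1 ≤ c ∧ c < c + 1 + rest.length ∧ s ∈ rest.getD (c - (c+1)) []) := by
        rintro ⟨h1, -, -⟩; omega
      rw [if_neg hB]
      by_cases hmem : s ∈ r
      · have hA : c ≤ c ∧ c < c + (r::rest).length ∧ s ∈ (r::rest).getD (c - c) [] :=
          ⟨le_rfl, by simp, by simpa using hmem⟩
        rw [if_pos hA, hget_off_in hmem]
      · have hA : ¬(c ≤ c ∧ c < c + (r::rest).length ∧ s ∈ (r::rest).getD (c - c) []) := by
          rintro ⟨-, -, h3⟩
          simp only [Nat.sub_self, List.getD_cons_zero] at h3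
          exact hmem h3
        rw [if_neg hA, hget_off_out hmem]
    · rcases hgd hceq with hgd' | hlo
      · rw [hget_ne c hceq]
        by_cases hB : (off + 1 ≤ c ∧ c < off + 1 + rest.length ∧ s ∈ rest.getD (c - (off+1)) [])
        · rw [if_pos hB, if_pos ⟨by omega, by simp only [List.length_cons]; omega, by rw [hgd']; exact hB.2.2⟩]
        · have hA : ¬(off ≤ c ∧ c < off + (r::rest).length ∧ s ∈ (r::rest).getD (c - off) []) := by
            rintro ⟨h1, h2, h3⟩
            rw [hgd'] at h3
            exact hB ⟨by omega, by simp only [List.length_cons] at h2; omega, h3⟩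
          rw [if_neg hB, if_neg hA]
      · rw [hget_ne c hceq]
        rw [if_neg (by rintro ⟨h1, -, -⟩; omega), if_neg (by rintro ⟨h1, -, -⟩; omega)]

theorem pvRowZero (racks : List (List Int)) (s : Int) :
    (PySem.List.enumerate racks 0).foldl
      (fun row p => if s ∈ p.2 then PySem.List.pySetD row p.1 1 else row)
      (List.replicate racks.length (0:Int)) = pvRowOf racks s := by
  obtain ⟨hlen, hget⟩ := pvRowFold racks 0 (List.replicate racks.length (0:Int)) s (by simp)
  simp only [Nat.cast_zero] at hlen hget
  apply List.ext_getElem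
  · rw [hlen]; simp [pvRowOf]
  · intro i h1 h2
    have hi : i < racks.length := by simpa [pvRowOf] using h2
    have hi' : i < (List.replicate racks.length (0:Int)).length := by simpa using hi
    have h3 := hget i hi'
    rw [List.getD_eq_getElem _ _ h1] at h3
    rw [h3]
    simp only [pvRowOf, List.getElem_map]
    by_cases hmem : s ∈ racks[i]
    · rw [if_pos ⟨Nat.zero_le _, by omega, by
        rw [show i - 0 = i from rfl, List.getD_eq_getElem _ _ hi]; exact hmem⟩, if_pos hmem]
    · rw [if_neg (by
        rintro ⟨-, -, h4⟩
        rw [show i - 0 = i from rfl, List.getD_eq_getElem _ _ hi] at h4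
        exact hmem h4), if_neg hmem]
      simp

theorem pvPairs_cons (r : List Int) (rest : List (List Int)) (off : Int) :
    pvPairs (r :: rest) off = r.map (fun sku => (sku, off)) ++ pvPairs rest (off+1) := by
  rw [pvPairs, PySem.List.enumerate_cons, List.flatMap_cons, pvPairs]

theorem pvMap_fst_pvPairs (racks : List (List Int)) : ∀ off : Int,
    (pvPairs racks off).map (fun p => p.1) = racks.flatten := by
  induction racks with
  | nil => intro off; simp [pvPairs, PySem.List.enumerate_nil]
  | cons r rest ih =>
    intro off
    rw [pvPairs_cons, List.map_append, List.map_map, ih (off+1), List.flatten_cons]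
    congr 1
    exact List.map_id r

theorem pvNestedInsert (l : List (Int × List Int)) : ∀ d : PySem.Dict Int Int,
    l.foldl (fun d p => p.2.foldl (fun d sku => d.insert sku p.1) d) d =
      (l.flatMap (fun p => p.2.map (fun sku => (sku, p.1)))).foldl (fun d q => d.insert q.1 q.2) d := by
  induction l with
  | nil => intro d; simp
  | cons p rest ih =>
    intro d
    rw [List.foldl_cons, List.flatMap_cons, List.foldl_append, ih, List.foldl_map]

theorem pvPos_items (racks : List (List Int)) (hnd : racks.flatten.Nodup) :
    ((PySem.List.enumerate racks 0).foldl
      (fun d p => p.2.foldl (fun d sku => d.insert sku p.1) d)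
      (PySem.Dict.empty : PySem.Dict Int Int)).items = pvPairs racks 0 := by
  rw [pvNestedInsert]
  have hfresh : ∀ a ∈ pvPairs racks 0, (PySem.Dict.empty : PySem.Dict Int Int).contains a.1 = false := by
    intro a ha
    simp [PySem.Dict.contains, PySem.Dict.empty]
  have hnodup : ((pvPairs racks 0).map (fun p => p.1)).Nodup := by
    rw [pvMap_fst_pvPairs]; exact hnd
  have := PySem.Dict.items_foldl_insert_fresh (pvPairs racks 0) (fun p => p.1) (fun p => p.2)
    (PySem.Dict.empty : PySem.Dict Int Int) hfresh hnodup
  simpa [PySem.Dict.empty] using this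

theorem pvFind_pvPairs_none (racks : List (List Int)) : ∀ (off : Int) (s : Int),
    s ∉ racks.flatten →
    (pvPairs racks off).find? (fun p => p.1 == s) = none := by
  intro off s h
  rw [List.find?_eq_none]
  intro p hp
  have : p.1 ∈ racks.flatten := by
    rw [← pvMap_fst_pvPairs racks off]
    exact List.mem_map_of_mem hp
  intro hc
  rw [beq_iff_eq] at hc
  exact h (hc ▸ this)

theorem pvFindRow (r : List Int) (off : Int) (s : Int) (hs : s ∈ r) :
    (r.map (fun sku => (sku, off))).find? (fun p => p.1 == s) = some (s, off) := by
  induction r with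
  | nil => cases hs
  | cons a r' ih =>
    rw [List.map_cons]
    by_cases ha : a = s
    · subst ha
      rw [List.find?_cons_of_pos (by simp)]
    · rw [List.find?_cons_of_neg (by simpa using ha)]
      exact ih ((List.mem_cons.mp hs).resolve_left (fun h => ha h.symm))

theorem pvFind_pvPairs_some (racks : List (List Int)) : racks.flatten.Nodup →
    ∀ (off : Int) (c : Nat) (hc : c < racks.length) (s : Int), s ∈ racks[c] →
    (pvPairs racks off).find? (fun p => p.1 == s) = some (s, off + c) := by
  induction racks with
  | nil => intro _ off c hc s hs; exact absurd hc (by simp)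
  | cons r rest ih =>
    intro hnd off c hc s hs
    rw [List.flatten_cons, List.nodup_append] at hnd
    obtain ⟨hndr, hndrest, hdisj⟩ := hnd
    rw [pvPairs_cons, List.find?_append]
    cases c with
    | zero =>
      simp only [List.getElem_cons_zero] at hs
      rw [pvFindRow r off s hs]
      simp
    | succ c' =>
      simp only [List.getElem_cons_succ] at hs
      have hc' : c' < rest.length := by simpa using hc
      have hsrest : s ∈ rest.flatten := List.mem_flatten.mpr ⟨rest[c'], List.getElem_mem hc', hs⟩
      have hsnr : s ∉ r := fun hr => hdisj s hr s hsrest rfl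
      have h1 : (r.map (fun sku => (sku, off))).find? (fun p => p.1 == s) = none := by
        rw [List.find?_eq_none]
        intro p hp hc2
        rw [beq_iff_eq] at hc2
        obtain ⟨sku, hsku, rfl⟩ := List.mem_map.mp hp
        exact hsnr (hc2 ▸ hsku)
      rw [h1, Option.none_or, ih hndrest (off+1) c' (by simpa using hc) s hs]
      congr 1
      push_cast
      ring_nf

theorem pvDisjointAt (racks : List (List Int)) (hnd : racks.flatten.Nodup)
    (c c' : Nat) (hc : c < racks.length) (hc' : c' < racks.length) (hne : c ≠ c')
    (s : Int) (hs : s ∈ racks[c]) : s ∉ racks[c'] := by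
  have hpw := (List.nodup_flatten.mp hnd).2
  rw [List.pairwise_iff_getElem] at hpw
  rcases Nat.lt_or_ge c c' with h | h
  · exact fun hmem => (hpw c c' hc hc' h) hs hmem
  · have hlt : c' < c := by omega
    exact fun hmem => (hpw c' c hc' hc hlt) hmem hs

theorem pvRowOf_eq_oneHot (racks : List (List Int)) (hnd : racks.flatten.Nodup)
    (c : Nat) (hc : c < racks.length) (s : Int) (hs : s ∈ racks[c]) :
    pvRowOf racks s = pvOneHot (racks.length : Int) (c : Int) := by
  rw [pvOneHot, PySem.List.pyRange_one]
  apply List.ext_getElem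
  · simp [pvRowOf]
  · intro i h1 h2
    simp only [pvRowOf, List.getElem_map, List.getElem_range]
    simp only [pvRowOf, List.length_map] at h1
    have h0 : ((0:Int) + (i:Int)) = (i:Int) := by ring
    by_cases hie : i = c
    · subst hie
      rw [if_pos hs, if_pos (by rw [h0]; exact beq_iff_eq.mpr rfl)]
    · rw [if_neg (pvDisjointAt racks hnd c i hc h1 (fun h => hie h.symm) s hs),
        if_neg (by rw [h0]; simp; omega)]

theorem pvAny_rowOf (racks : List (List Int)) (s : Int) :
    ((pvRowOf racks s).any (fun v => !(v == 0)) = true) ↔ s ∈ racks.flatten := by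
  rw [pvRowOf, List.any_map, List.any_eq_true, List.mem_flatten]
  constructor
  · rintro ⟨r, hr, hv⟩
    by_cases hmem : s ∈ r
    · exact ⟨r, hr, hmem⟩
    · simp [Function.comp, hmem] at hv
  · rintro ⟨r, hr, hmem⟩
    exact ⟨r, hr, by simp [Function.comp, hmem]⟩

theorem pvFilterMap_ite {α : Type} (l : List Nat) (P : Nat → Prop) [DecidablePred P] (F : Nat → α) :
    l.filterMap (fun s => if P s then some (F s) else none) =
      (l.filter (fun s => decide (P s))).map F := by
  induction l with
  | nil => rfl
  | cons a l ih =>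
    by_cases h : P a
    · rw [List.filterMap_cons, List.filter_cons]
      simp only [h, if_pos, decide_true]
      rw [List.map_cons, ih]
    · rw [List.filterMap_cons, List.filter_cons]
      simp only [h, if_false, decide_false, Bool.false_eq_true]
      exact ih

theorem pvFilterMap_range_extend {α : Type} (G : Nat → Option α) (N M : Nat) (h : N ≤ M)
    (hnone : ∀ s, N ≤ s → s < M → G s = none) :
    (List.range M).filterMap G = (List.range N).filterMap G := by
  rw [show M = N + (M - N) from by omega, List.range_add, List.filterMap_append,
    List.filterMap_map]
  have : ∀ a ∈ List.range (M - N), (G ∘ (fun x => N + x)) a = none := by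
    intro a ha
    rw [List.mem_range] at ha
    exact hnone (N + a) (by omega) (by omega)
  rw [List.filterMap_eq_nil_iff.mpr this, List.append_nil]

-- ===== VERDICT (by name: the statement is the Claim_ definition above) =====
theorem genInitialRacks_spec : Claim_equal_genInitialRacks := by
  intro skuNum cap orders hdom hpre
  obtain ⟨hc1, hc2, hor⟩ := hpre
  show genInitialRacks skuNum cap orders = genInitialRacks_alt skuNum cap orders
  -- shared data
  set os := pvSortedOrders orders with hos
  have hosmem : ∀ o ∈ os, ∀ x ∈ o, 0 ≤ x ∧ x < skuNum := by
    intro o ho x hx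
    rw [hos, pvSortedOrders, List.mem_map] at ho
    obtain ⟨p, hp, rfl⟩ := ho
    exact hor p ((PySem.List.mem_sorted orders _ false p).mp hp) x hx
  set allS : List Int := os.flatten ++ PySem.List.pyRange 0 skuNum 1 with hallS
  have hallmem : ∀ x ∈ allS, 0 ≤ x ∧ x < skuNum := by
    intro x hx
    rcases List.mem_append.mp hx with h | h
    · obtain ⟨o, ho, hxo⟩ := List.mem_flatten.mp h
      exact hosmem o ho x hxo
    · exact ⟨(PySem.List.mem_pyRange_one.mp h).1, (PySem.List.mem_pyRange_one.mp h).2⟩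
  set stream : List Int := pvDD PySem.Set.empty allS with hstream
  have hmemstream : ∀ y : Int, y ∈ stream ↔ y ∈ allS := by
    intro y
    rw [hstream, pvMem_pvDD]
    simp [PySem.Set.empty]
  have hstreamrange : ∀ y ∈ stream, 0 ≤ y ∧ y < skuNum :=
    fun y hy => hallmem y ((hmemstream y).mp hy)
  have hnds : stream.Nodup := pvNodup_pvDD allS PySem.Set.empty
  have hlen : skuNum.toNat ≤ stream.length := by
    have hsub : PySem.List.pyRange 0 skuNum 1 ⊆ stream :=
      fun y hy => (hmemstream y).mpr (List.mem_append_right _ hy)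
    have := (List.subperm_of_subset (PySem.List.nodup_pyRange_one 0 skuNum) hsub).length_le
    simpa [PySem.List.length_pyRange_one] using this
  set capN := cap.toNat with hcapN
  have hcapN1 : 1 ≤ capN := by omega
  have hcaple : capN ≤ stream.length := by omega
  set racks : List (List Int) := pvChunk capN stream with hracks
  have hlenracks : racks.length = stream.length / capN := by
    rw [hracks, pvChunk]; simp
  have hq1 : 1 ≤ stream.length / capN := by
    rw [Nat.le_div_iff_mul_le (by omega)]; omega
  have hflat : racks.flatten = stream.take ((stream.length / capN) * capN) := by
    rw [hracks, pvFlatten_chunk capN (by omega) stream]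
  have hndf : racks.flatten.Nodup := by
    rw [hflat]; exact (List.take_sublist _ _).nodup hnds
  have hflatrange : ∀ y ∈ racks.flatten, 0 ≤ y ∧ y < skuNum := by
    intro y hy
    rw [hflat] at hy
    exact hstreamrange y (List.mem_of_mem_take hy)
  have hflatne : racks.flatten ≠ [] := by
    rw [hflat]
    have h1 : capN ≤ (stream.length / capN) * capN := by
      calc capN = 1 * capN := (Nat.one_mul _).symm
      _ ≤ (stream.length / capN) * capN := Nat.mul_le_mul_right _ hq1
    have h2 : 0 < (stream.take ((stream.length / capN) * capN)).length := by
      rw [List.length_take]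
      have := Nat.div_mul_le_self stream.length capN
      omega
    exact List.ne_nil_of_length_pos h2
  -- A reduces to pvTransform racks
  have hA : genInitialRacks skuNum cap orders = pvTransform racks := by
    have hArel : pvRel skuNum (List.replicate skuNum.toNat 0) PySem.Set.empty := by
      refine ⟨by simp, ?_⟩
      intro s hs0 hsn
      rw [PySem.List.pyGet?_of_nonneg _ hs0]
      have : s.toNat < skuNum.toNat := by omega
      simp [this, PySem.Set.empty]
    have hAfold := pvMainA cap skuNum hc1 allS [] (List.replicate skuNum.toNat 0) []
      PySem.Set.empty hallmem hArel (by simpa using hc1)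
    simp only [genInitialRacks]
    congr 1
    calc ((PySem.List.pyRange 0 skuNum 1).foldl (pvStepA cap)
          ((pvSortedOrders orders).foldl (fun st order => order.foldl (pvStepA cap) st)
            ([], List.replicate skuNum.toNat 0, []))).1
        = (allS.foldl (pvStepA cap) ([], List.replicate skuNum.toNat 0, [])).1 := by
          rw [show ((pvSortedOrders orders).foldl (fun st order => order.foldl (pvStepA cap) st)
              (([] : List (List Int)), List.replicate skuNum.toNat 0, ([] : List Int))) =
              (pvSortedOrders orders).flatten.foldl (pvStepA cap)
                ([], List.replicate skuNum.toNat 0, []) from (List.foldl_flatten).symm,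
            hallS, List.foldl_append]
      _ = ((pvDD PySem.Set.empty allS).foldl (pvCF cap) ([], [])).1 := hAfold.1
      _ = racks := by rw [← hstream, pvCF_chunk cap hc1 stream, ← hcapN, ← hracks]
  -- the transform written as ascending one-hot rows
  have hT : pvTransform racks =
      (List.range skuNum.toNat).filterMap
        (fun (s : Nat) => if (s:Int) ∈ racks.flatten then some (pvRowOf racks (s:Int)) else none) := by
    obtain ⟨y0, hy0⟩ := List.exists_mem_of_ne_nil _ hflatne
    have hne' : PySem.Set.ofList racks.flatten ≠ [] :=
      List.ne_nil_of_mem ((PySem.Set.mem_ofList _ y0).mpr hy0)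
    cases hmx : PySem.List.max? (PySem.Set.ofList racks.flatten) (fun x => x) with
    | none => exact absurd (Iff.mp (PySem.List.max?_eq_none_iff _ _) hmx) hne'
    | some m =>
    have hmmem : m ∈ racks.flatten := (PySem.Set.mem_ofList _ m).mp (PySem.List.max?_mem hmx)
    have hmax' : ∀ y ∈ racks.flatten, y ≤ m :=
      fun y hy => PySem.List.max?_isMax hmx y ((PySem.Set.mem_ofList _ y).mpr hy)
    obtain ⟨hm0, hmlt⟩ := hflatrange m hmmem
    have hNcast : (((m+1).toNat : Nat) : Int) = m + 1 := by omega
    have hred : pvTransform racks =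
        ((PySem.List.enumerate racks 0).foldl
          (fun mm p => p.2.foldl (fun mm sku => pvSetCell mm sku p.1) mm)
          ((PySem.List.pyRange 0 (m+1) 1).map (fun _ => List.replicate racks.length (0:Int)))).filter
          (fun row => row.any (fun v => !(v == 0))) := by
      rw [pvTransform, hmx]
    have hM0 : (PySem.List.pyRange 0 (m+1) 1).map (fun _ => List.replicate racks.length (0:Int)) =
        (List.range (m+1).toNat).map (fun _ : Nat => List.replicate racks.length (0:Int)) := by
      rw [PySem.List.pyRange_one, List.map_map]
      simp [Function.comp_def]
    have hbounds : ∀ r ∈ racks, ∀ x ∈ r, 0 ≤ x ∧ (x:Int) < ((m+1).toNat : Nat) := by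
      intro r hr x hx
      have hmem : x ∈ racks.flatten := List.mem_flatten.mpr ⟨r, hr, hx⟩
      exact ⟨(hflatrange x hmem).1, by rw [hNcast]; have := hmax' x hmem; omega⟩
    rw [hred, hM0, pvOuter racks (m+1).toNat 0 _ hbounds,
      List.map_congr_left (fun (s : Nat) _ => pvRowZero racks (s:Int)),
      List.filter_map]
    have hfc : ∀ s ∈ List.range (m+1).toNat,
        ((fun row => row.any (fun v => !(v == 0))) ∘ (fun (s : Nat) => pvRowOf racks (s:Int))) s =
        decide ((s:Int) ∈ racks.flatten) := by
      intro s _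
      by_cases h : (s:Int) ∈ racks.flatten
      · simp only [Function.comp_apply, decide_eq_true h]
        exact (pvAny_rowOf racks (s:Int)).mpr h
      · simp only [Function.comp_apply, decide_eq_false h]
        rw [← Bool.not_eq_true]
        intro hc
        exact h ((pvAny_rowOf racks (s:Int)).mp hc)
    rw [List.filter_congr hfc]
    have hNM : (m+1).toNat ≤ skuNum.toNat := by omega
    have hnone : ∀ s : Nat, (m+1).toNat ≤ s → s < skuNum.toNat →
        (if (s:Int) ∈ racks.flatten then some (pvRowOf racks (s:Int)) else none) = none := by
      intro s h1 h2
      rw [if_neg]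
      intro hc
      have := hmax' (s:Int) hc
      omega
    rw [pvFilterMap_range_extend _ _ _ hNM hnone, pvFilterMap_ite]
  -- B computes the same rows
  have hB : genInitialRacks_alt skuNum cap orders =
      (List.range skuNum.toNat).filterMap
        (fun (s : Nat) => if (s:Int) ∈ racks.flatten then some (pvRowOf racks (s:Int)) else none) := by
    have hBrel : pvRelB skuNum (List.replicate skuNum.toNat false) PySem.Set.empty := by
      refine ⟨by simp, ?_⟩
      intro s hs0 hsn
      rw [PySem.List.pyGet?_of_nonneg _ hs0]
      have : s.toNat < skuNum.toNat := by omega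
      simp [this, PySem.Set.empty]
    have hsfold : ((PySem.List.pyRange 0 skuNum 1).foldl pvStepB
        ((pvSortedOrders orders).foldl (fun st order => order.foldl pvStepB st)
          (List.replicate skuNum.toNat false, ([] : List Int)))).2 = stream := by
      rw [show ((pvSortedOrders orders).foldl (fun st order => order.foldl pvStepB st)
          (List.replicate skuNum.toNat false, ([] : List Int))) =
          (pvSortedOrders orders).flatten.foldl pvStepB (List.replicate skuNum.toNat false, []) from
          (List.foldl_flatten).symm,
        ← List.foldl_append, ← hallS]
      rw [(pvMainB skuNum allS (List.replicate skuNum.toNat false) [] PySem.Set.empty hallmem hBrel).1]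
      simp [hstream]
    simp only [genInitialRacks_alt]
    rw [hsfold]
    have hracksB : (PySem.List.pyRange 0 ((stream.length : Int) - cap + 1) cap).map
        (fun i => PySem.List.slice stream (some i) (some (i + cap))) = racks := by
      rw [pvSliceChunk cap (by omega) stream, ← hcapN, ← hracks]
    rw [hracksB]
    have hpos : ((PySem.List.enumerate racks 0).foldl
        (fun d p => p.2.foldl (fun d sku => d.insert sku p.1) d)
        (PySem.Dict.empty : PySem.Dict Int Int)).items = pvPairs racks 0 := pvPos_items racks hndf
    rw [PySem.List.pyRange_one, List.filterMap_map]
    rw [show (skuNum - 0).toNat = skuNum.toNat by norm_num]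
    apply List.filterMap_congr
    intro s hs
    simp only [Function.comp_apply, PySem.Dict.get?, hpos]
    have h0s : ((0:Int) + (s:Int)) = (s:Int) := by ring
    rw [h0s]
    by_cases hsf : (s:Int) ∈ racks.flatten
    · obtain ⟨r, hr, hsr⟩ := List.mem_flatten.mp hsf
      obtain ⟨c, hc, rfl⟩ := List.mem_iff_getElem.mp hr
      rw [pvFind_pvPairs_some racks hndf 0 c hc (s:Int) hsr, if_pos hsf]
      simp only [Option.map_some, zero_add]
      rw [← pvRowOf_eq_oneHot racks hndf c hc (s:Int) hsr]
    · rw [pvFind_pvPairs_none racks 0 (s:Int) hsf, if_neg hsf]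
      rfl
  rw [hA, hT, hB]
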